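-- pv_equiv track=rewrite | github.com/ljg6861/anton_new | server/agent/concept_graph.py | expand_nodes
-- ===== SOURCE A (Python) =====
-- from typing import Dict, List, Tuple, Any, Optional
--
-- def _dedupe_keep_order(xs: List[str]) -> List[str]:
--     seen = set()
--     out = []
--     for x in xs:
--         if x not in seen:
--             seen.add(x)
--             out.append(x)
--     return out
--
-- def expand_nodes(node_ids: List[str],
--                  adj: Dict[str, Dict[str, List[str]]],
--                  edge_types: Tuple[str, ...] = ("depends_on",),
--                  radius: int = 1) -> List[str]:
--     """
--     Expand by following specified edge types up to 'radius' hops.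
--     """
--     frontier = list(node_ids)
--     out = list(node_ids)
--     for _ in range(radius):
--         nxt: List[str] = []
--         for nid in frontier:
--             for et in edge_types:
--                 for dst in adj.get(et, {}).get(nid, []):
--                     nxt.append(dst)
--         nxt = _dedupe_keep_order(nxt)
--         # stop if no growth
--         new = [x for x in nxt if x not in out]
--         if not new:
--             break
--         out.extend(new)
--         frontier = new
--     return _dedupe_keep_order(out)
-- ===== SOURCE B (Python) =====
-- from typing import Dict, List, Tuple
--
-- def expand_nodes(node_ids: List[str],
--                  adj: Dict[str, Dict[str, List[str]]],
--                  edge_types: Tuple[str, ...] = ("depends_on",),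
--                  radius: int = 1) -> List[str]:
--     """
--     Expand by following specified edge types up to 'radius' hops.
--     Single-queue BFS: each node carries its hop distance; a visited set
--     dedupes on the fly, so 'out' is emitted in level order, already unique.
--     """
--     visited = set()
--     out: List[str] = []
--     for nid in node_ids:
--         if nid not in visited:
--             visited.add(nid)
--             out.append(nid)
--     queue = [(nid, 0) for nid in out]
--     i = 0
--     while i < len(queue):
--         u, d = queue[i]
--         i += 1
--         if d < radius:
--             for et in edge_types:
--                 for dst in adj.get(et, {}).get(u, []):
--                     if dst not in visited:
--                         visited.add(dst)
--                         out.append(dst)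
--                         queue.append((dst, d + 1))
--     return out
-- ===== Notes on version B (the rewrite author's own statement) =====
-- stated objective: faster
-- what changed: Replaced A's per-level frontier lists with their repeated _dedupe_keep_order passes and O(n) 'x not in out' list scans by a single FIFO queue of (node, depth) pairs and a visited set that dedupes each node once at discovery time, emitting 'out' already unique in level order.
import Mathlib
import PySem

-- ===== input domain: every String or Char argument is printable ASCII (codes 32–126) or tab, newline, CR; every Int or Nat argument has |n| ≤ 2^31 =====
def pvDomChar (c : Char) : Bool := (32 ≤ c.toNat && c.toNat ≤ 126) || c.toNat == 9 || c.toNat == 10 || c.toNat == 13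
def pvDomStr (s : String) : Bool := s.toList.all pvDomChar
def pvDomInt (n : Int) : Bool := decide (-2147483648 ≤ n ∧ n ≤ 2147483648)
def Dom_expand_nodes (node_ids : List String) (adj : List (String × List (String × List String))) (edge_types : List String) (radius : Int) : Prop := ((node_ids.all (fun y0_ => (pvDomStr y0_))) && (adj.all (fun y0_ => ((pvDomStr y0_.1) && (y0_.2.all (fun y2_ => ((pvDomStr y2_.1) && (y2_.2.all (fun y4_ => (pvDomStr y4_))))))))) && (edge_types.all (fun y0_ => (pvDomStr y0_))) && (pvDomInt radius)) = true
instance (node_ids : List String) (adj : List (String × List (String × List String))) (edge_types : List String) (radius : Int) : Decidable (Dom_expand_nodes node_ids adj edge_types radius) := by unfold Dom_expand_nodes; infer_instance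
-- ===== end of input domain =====

-- B replaces A's per-level frontier lists, dedupe passes and `x not in out` LIST scans by a
-- single distance-carrying BFS queue with a visited set (objective: faster, same return value).

-- ===== PORT A =====

-- adj.get(et, {}).get(nid, [])  (shared lookup chain, appears verbatim in both Pythons)
def pvLookup (adj : List (String × List (String × List String))) (et nid : String) : List String :=
  (PySem.Dict.mk ((PySem.Dict.mk adj).getD et [])).getD nid []

-- helper _dedupe_keep_order
def pvDedupeKeepOrder (xs : List String) : List String :=
  (xs.foldl
    (fun (st : PySem.Set String × List String) x =>
      if PySem.Set.contains st.1 x then st else (PySem.Set.add st.1 x, st.2 ++ [x]))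
    (PySem.Set.empty, [])).2

-- the 'for _ in range(radius)' loop with its early break
def pvLoopA (adj : List (String × List (String × List String))) (edge_types : List String) :
    Nat → List String → List String → List String
  | 0, _, out => out
  | n+1, frontier, out =>
    let nxt := frontier.foldl
      (fun acc nid => edge_types.foldl
        (fun acc2 et => (pvLookup adj et nid).foldl (fun a dst => a ++ [dst]) acc2) acc) []
    let nxt2 := pvDedupeKeepOrder nxt
    let newL := nxt2.filter (fun x => !(out.contains x))
    if newL.isEmpty then out else pvLoopA adj edge_types n newL (out ++ newL)

def expand_nodes (node_ids : List String) (adj : List (String × List (String × List String))) (edge_types : List String) (radius : Int) : List String :=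
  pvDedupeKeepOrder (pvLoopA adj edge_types radius.toNat node_ids node_ids)

-- ===== PORT B =====

-- the 'while i < len(queue)' loop; the Nat argument is a fuel guard making the recursion
-- structural — it is chosen ≥ the number of possible enqueues, so it never runs out
def pvGoB (adj : List (String × List (String × List String))) (edge_types : List String) (radius : Int) :
    Nat → List (String × Int) → PySem.Set String → List String → List String
  | 0, _, _, out => out
  | fuel+1, queue, visited, out =>
    match queue with
    | [] => out
    | (u, d) :: rest =>
      if d < radius then
        let st := edge_types.foldl
          (fun (st : PySem.Set String × List String × List (String × Int)) et =>
            (pvLookup adj et u).foldl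
              (fun st dst =>
                if PySem.Set.contains st.1 dst then st
                else (PySem.Set.add st.1 dst, st.2.1 ++ [dst], st.2.2 ++ [(dst, d + 1)]))
              st)
          (visited, out, rest)
        pvGoB adj edge_types radius fuel st.2.2 st.1 st.2.1
      else pvGoB adj edge_types radius fuel rest visited out

-- fuel bound: seeds + one per dst occurrence in adj
def pvAdjSize (adj : List (String × List (String × List String))) : Nat :=
  adj.foldl (fun acc p => p.2.foldl (fun acc2 q => acc2 + q.2.length) acc) 0

def expand_nodes_alt (node_ids : List String) (adj : List (String × List (String × List String))) (edge_types : List String) (radius : Int) : List String :=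
  let seed := node_ids.foldl
    (fun (st : PySem.Set String × List String) nid =>
      if PySem.Set.contains st.1 nid then st else (PySem.Set.add st.1 nid, st.2 ++ [nid]))
    (PySem.Set.empty, [])
  pvGoB adj edge_types radius (node_ids.length + pvAdjSize adj + 1)
    (seed.2.map (fun nid => (nid, (0 : Int)))) seed.1 seed.2

-- ===== PRECONDITION & SPEC =====
def Spec_expand_nodes (node_ids : List String) (adj : List (String × List (String × List String))) (edge_types : List String) (radius : Int) (out : List String) : Prop := out = expand_nodes_alt node_ids adj edge_types radius
instance (node_ids : List String) (adj : List (String × List (String × List String))) (edge_types : List String) (radius : Int) (out : List String) : Decidable (Spec_expand_nodes node_ids adj edge_types radius out) := by unfold Spec_expand_nodes; infer_instance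

-- ===== CLAIM (what is proved, stated in full; the proofs are below) =====
def Claim_equal_expand_nodes : Prop := ∀ (node_ids : List String) (adj : List (String × List (String × List String))) (edge_types : List String) (radius : Int), Dom_expand_nodes node_ids adj edge_types radius → Spec_expand_nodes node_ids adj edge_types radius (expand_nodes node_ids adj edge_types radius)

-- ===== LEMMAS AND PROOFS =====

-- the common seen-set/output step both Pythons use ('if x not in seen: seen.add(x); out.append(x)')
def pvCStep (st : PySem.Set String × List String) (x : String) : PySem.Set String × List String :=
  if PySem.Set.contains st.1 x then st else (PySem.Set.add st.1 x, st.2 ++ [x])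

def pvCollect (V : PySem.Set String) (xs : List String) : PySem.Set String × List String :=
  xs.foldl pvCStep (V, [])

-- neighbours of u, level-order
def pvNbr (adj : List (String × List (String × List String))) (ets : List String) (u : String) : List String :=
  ets.flatMap (fun et => pvLookup adj et u)

-- canonical level-by-level loop both ports are reduced to
def pvCanon (adj : List (String × List (String × List String))) (ets : List String) :
    Nat → List String → PySem.Set String → List String → List String
  | 0, _, _, out => out
  | n+1, frontier, V, out =>
    let st := pvCollect V (frontier.flatMap (pvNbr adj ets))
    pvCanon adj ets n st.2 st.1 (out ++ st.2)

def pvAllDst (adj : List (String × List (String × List String))) : List String :=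
  adj.flatMap (fun p => p.2.flatMap (fun q => q.2))

def pvFresh (adj : List (String × List (String × List String))) (V : PySem.Set String) : Nat :=
  ((PySem.Set.ofList (pvAllDst adj)).filter (fun y => !(PySem.Set.contains V y))).length

-- ---- generic facts about pvCollect ----

theorem pvCStep_mem (st : PySem.Set String × List String) (x : String) (h : x ∈ st.1) :
    pvCStep st x = st := by
  simp [pvCStep, h]

theorem pvCStep_not_mem (st : PySem.Set String × List String) (x : String) (h : x ∉ st.1) :
    pvCStep st x = (PySem.Set.add st.1 x, st.2 ++ [x]) := by
  simp [pvCStep, h]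

theorem pvCollect_acc (xs : List String) (V : PySem.Set String) (acc : List String) :
    xs.foldl pvCStep (V, acc) = ((pvCollect V xs).1, acc ++ (pvCollect V xs).2) := by
  induction xs generalizing V acc with
  | nil => simp [pvCollect]
  | cons x xs ih =>
    simp only [pvCollect, List.foldl_cons]
    by_cases h : x ∈ V
    · rw [pvCStep_mem (V, acc) x h, pvCStep_mem (V, []) x h]
      exact ih V acc
    · rw [pvCStep_not_mem (V, acc) x h, pvCStep_not_mem (V, []) x h]
      dsimp only [List.nil_append]
      rw [ih (V.add x) (acc ++ [x]), ih (V.add x) [x]]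
      simp [pvCollect]

theorem pvCollect_cons_mem (x : String) (xs : List String) (V : PySem.Set String) (h : x ∈ V) :
    pvCollect V (x :: xs) = pvCollect V xs := by
  simp only [pvCollect, List.foldl_cons]
  rw [pvCStep_mem (V, []) x h]

theorem pvCollect_cons_not_mem (x : String) (xs : List String) (V : PySem.Set String) (h : x ∉ V) :
    pvCollect V (x :: xs) = ((pvCollect (PySem.Set.add V x) xs).1,
      x :: (pvCollect (PySem.Set.add V x) xs).2) := by
  simp only [pvCollect, List.foldl_cons]
  rw [pvCStep_not_mem (V, []) x h]
  rw [show (List.foldl pvCStep (V.add x, [] ++ [x]) xs) = List.foldl pvCStep (V.add x, [x]) xs by rfl]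
  rw [show (List.foldl pvCStep (V.add x, [x]) xs) = xs.foldl pvCStep (V.add x, [x]) from rfl,
      pvCollect_acc]
  rfl

theorem pvCollect_mem_fst (xs : List String) (V : PySem.Set String) (y : String) :
    y ∈ (pvCollect V xs).1 ↔ y ∈ V ∨ y ∈ xs := by
  induction xs generalizing V with
  | nil => simp [pvCollect]
  | cons x xs ih =>
    by_cases h : x ∈ V
    · rw [pvCollect_cons_mem x xs V h, ih]
      simp only [List.mem_cons]
      constructor
      · tauto
      · rintro (hy | hy | hy) <;> try tauto
        subst hy; tauto
    · rw [pvCollect_cons_not_mem x xs V h]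
      simp only [ih, PySem.Set.mem_add, List.mem_cons]
      tauto

theorem pvCollect_mem_snd (xs : List String) (V : PySem.Set String) (y : String) :
    y ∈ (pvCollect V xs).2 ↔ y ∈ xs ∧ y ∉ V := by
  induction xs generalizing V with
  | nil => simp [pvCollect]
  | cons x xs ih =>
    by_cases h : x ∈ V
    · rw [pvCollect_cons_mem x xs V h, ih]
      simp only [List.mem_cons]
      constructor
      · tauto
      · rintro ⟨hy | hy, hv⟩
        · subst hy; exact absurd h hv
        · exact ⟨hy, hv⟩
    · rw [pvCollect_cons_not_mem x xs V h]
      simp only [List.mem_cons, ih, PySem.Set.mem_add]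
      constructor
      · rintro (hy | ⟨hy, hv⟩)
        · subst hy; tauto
        · tauto
      · rintro ⟨hy | hy, hv⟩
        · tauto
        · by_cases hyx : y = x
          · tauto
          · tauto

theorem pvCollect_nodup_snd (xs : List String) (V : PySem.Set String) :
    (pvCollect V xs).2.Nodup := by
  induction xs generalizing V with
  | nil => simp [pvCollect]
  | cons x xs ih =>
    by_cases h : x ∈ V
    · rw [pvCollect_cons_mem x xs V h]; exact ih V
    · rw [pvCollect_cons_not_mem x xs V h]
      refine List.nodup_cons.mpr ⟨?_, ih _⟩
      intro hx
      rcases (pvCollect_mem_snd xs (V.add x) x).mp hx with ⟨_, hnv⟩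
      exact hnv ((PySem.Set.mem_add (V) x x).mpr (Or.inr rfl))

theorem pvCollect_noop (xs : List String) (V : PySem.Set String) (h : ∀ x ∈ xs, x ∈ V) :
    pvCollect V xs = (V, []) := by
  induction xs with
  | nil => simp [pvCollect]
  | cons x xs ih =>
    rw [pvCollect_cons_mem x xs V (h x (by simp))]
    exact ih (fun z hz => h z (by simp [hz]))

theorem pvCollect_append (xs ys : List String) (V : PySem.Set String) :
    pvCollect V (xs ++ ys) = ((pvCollect (pvCollect V xs).1 ys).1,
      (pvCollect V xs).2 ++ (pvCollect (pvCollect V xs).1 ys).2) := by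
  simp only [pvCollect, List.foldl_append]
  rw [show (List.foldl pvCStep (V, []) xs) = ((pvCollect V xs).1, (pvCollect V xs).2) from rfl]
  rw [show (ys.foldl pvCStep ((pvCollect V xs).1, (pvCollect V xs).2))
        = (((pvCollect (pvCollect V xs).1 ys)).1,
            (pvCollect V xs).2 ++ (pvCollect (pvCollect V xs).1 ys).2) from
      pvCollect_acc ys (pvCollect V xs).1 (pvCollect V xs).2]
  rfl

theorem pvCollect_empty (xs : List String) :
    pvCollect PySem.Set.empty xs = (PySem.Set.ofList xs, PySem.Set.ofList xs) := by
  rw [PySem.Set.ofList_eq_foldl]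
  suffices h : ∀ (s : PySem.Set String), xs.foldl pvCStep (s, s) = (xs.foldl PySem.Set.add s, xs.foldl PySem.Set.add s) by
    exact h []
  induction xs with
  | nil => intro s; simp
  | cons x xs ih =>
    intro s
    simp only [List.foldl_cons]
    by_cases h : x ∈ s
    · rw [pvCStep_mem (s, s) x h, PySem.Set.add_of_mem h, ih]
    · rw [pvCStep_not_mem (s, s) x h, PySem.Set.add_of_not_mem h, ih]

theorem pvDedupe_eq_ofList (xs : List String) : pvDedupeKeepOrder xs = PySem.Set.ofList xs := by
  show (pvCollect PySem.Set.empty xs).2 = PySem.Set.ofList xs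
  rw [pvCollect_empty]

-- dedupe-then-filter-against-out is a single fresh-collect against out's set
theorem pvFilterDedupe (xs : List String) (S V : PySem.Set String) (O : List String)
    (h : ∀ y : String, y ∈ V ↔ (y ∈ O ∨ y ∈ S)) :
    ((pvCollect S xs).2).filter (fun x => !(O.contains x)) = (pvCollect V xs).2 := by
  induction xs generalizing S V with
  | nil => simp [pvCollect]
  | cons x xs ih =>
    by_cases hS : x ∈ S
    · have hV : x ∈ V := (h x).mpr (Or.inr hS)
      rw [pvCollect_cons_mem _ _ _ hS, pvCollect_cons_mem _ _ _ hV]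
      exact ih S V h
    · by_cases hO : x ∈ O
      · have hV : x ∈ V := (h x).mpr (Or.inl hO)
        rw [pvCollect_cons_not_mem _ _ _ hS, pvCollect_cons_mem _ _ _ hV]
        dsimp only
        rw [List.filter_cons]
        have hc : (!(O.contains x)) = false := by simp [hO]
        simp only [hc, Bool.false_eq_true, if_false]
        refine ih (S.add x) V (fun y => ?_)
        rw [h y, PySem.Set.mem_add]
        constructor
        · tauto
        · rintro (hy | hy | hy)
          · tauto
          · tauto
          · subst hy; tauto
      · have hV : x ∉ V := fun hv => by
          rcases (h x).mp hv with h' | h'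
          · exact hO h'
          · exact hS h'
        rw [pvCollect_cons_not_mem _ _ _ hS, pvCollect_cons_not_mem _ _ _ hV]
        dsimp only
        rw [List.filter_cons]
        have hc : (!(O.contains x)) = true := by simp [hO]
        simp only [hc, if_true]
        congr 1
        refine ih (S.add x) (V.add x) (fun y => ?_)
        rw [PySem.Set.mem_add, PySem.Set.mem_add, h y]
        tauto

-- ---- port A = canonical level loop ----

theorem pvCanon_nil (adj : List (String × List (String × List String))) (ets : List String)
    (n : Nat) (V : PySem.Set String) (out : List String) :
    pvCanon adj ets n [] V out = out := by
  induction n generalizing V out with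
  | zero => rfl
  | succ n ih =>
    show pvCanon adj ets n (pvCollect V ([].flatMap (pvNbr adj ets))).2
      (pvCollect V ([].flatMap (pvNbr adj ets))).1
      (out ++ (pvCollect V ([].flatMap (pvNbr adj ets))).2) = out
    rw [show pvCollect V ([].flatMap (pvNbr adj ets)) = (V, []) from rfl]
    simpa using ih V out

theorem pvCanon_succ (adj : List (String × List (String × List String))) (ets : List String)
    (n : Nat) (frontier : List String) (V : PySem.Set String) (out : List String) :
    pvCanon adj ets (n+1) frontier V out
      = pvCanon adj ets n (pvCollect V (frontier.flatMap (pvNbr adj ets))).2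
          (pvCollect V (frontier.flatMap (pvNbr adj ets))).1
          (out ++ (pvCollect V (frontier.flatMap (pvNbr adj ets))).2) := rfl

theorem pvNxt_eq (adj : List (String × List (String × List String))) (ets : List String)
    (frontier : List String) :
    (frontier.foldl (fun acc nid => ets.foldl
        (fun acc2 et => (pvLookup adj et nid).foldl (fun a dst => a ++ [dst]) acc2) acc) [])
      = frontier.flatMap (pvNbr adj ets) := by
  have h1 : (fun (acc : List String) nid => ets.foldl
      (fun acc2 et => (pvLookup adj et nid).foldl (fun a dst => a ++ [dst]) acc2) acc)
      = fun acc nid => acc ++ pvNbr adj ets nid := by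
    funext acc nid
    have h2 : (fun (acc2 : List String) et => (pvLookup adj et nid).foldl (fun a dst => a ++ [dst]) acc2)
        = fun acc2 et => acc2 ++ pvLookup adj et nid := by
      funext acc2 et
      exact PySem.List.foldl_append_singleton_eq_self _ _
    rw [h2]
    exact PySem.List.foldl_append_eq_flatMap _ _ _
  rw [h1, PySem.List.foldl_append_eq_flatMap, List.nil_append]

theorem pvLoopA_eq_canon (adj : List (String × List (String × List String))) (ets : List String)
    (n : Nat) (frontier out : List String) (V : PySem.Set String)
    (h : ∀ y : String, y ∈ V ↔ y ∈ out) :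
    pvLoopA adj ets n frontier out = pvCanon adj ets n frontier V out := by
  induction n generalizing frontier out V with
  | zero => rfl
  | succ n ih =>
    have hnew : (pvDedupeKeepOrder (frontier.flatMap (pvNbr adj ets))).filter
        (fun x => !(out.contains x)) = (pvCollect V (frontier.flatMap (pvNbr adj ets))).2 := by
      rw [show pvDedupeKeepOrder (frontier.flatMap (pvNbr adj ets))
            = (pvCollect PySem.Set.empty (frontier.flatMap (pvNbr adj ets))).2 from rfl]
      exact pvFilterDedupe _ PySem.Set.empty V out (fun y => by rw [h y]; simp [PySem.Set.empty])
    simp only [pvLoopA, pvNxt_eq, hnew, pvCanon_succ]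
    by_cases he : ((pvCollect V (frontier.flatMap (pvNbr adj ets))).2).isEmpty
    · rw [if_pos he]
      have h0 : (pvCollect V (frontier.flatMap (pvNbr adj ets))).2 = [] := by
        simpa using he
      rw [h0, pvCanon_nil]
      simp
    · rw [if_neg he]
      apply ih
      intro y
      simp only [pvCollect_mem_fst, List.mem_append, pvCollect_mem_snd, h y]
      by_cases hy : y ∈ out <;> tauto

-- canon only appends fresh elements, so a final dedupe of out commutes in
theorem pvCanon_dedupe (adj : List (String × List (String × List String))) (ets : List String)
    (n : Nat) (frontier out : List String) (V : PySem.Set String)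
    (h : ∀ y ∈ out, y ∈ V) :
    PySem.Set.ofList (pvCanon adj ets n frontier V out)
      = pvCanon adj ets n frontier V (PySem.Set.ofList out) := by
  induction n generalizing frontier V out with
  | zero => rfl
  | succ n ih =>
    rw [pvCanon_succ, pvCanon_succ]
    have h' : ∀ y ∈ out ++ (pvCollect V (frontier.flatMap (pvNbr adj ets))).2,
        y ∈ (pvCollect V (frontier.flatMap (pvNbr adj ets))).1 := by
      intro y hy
      rcases List.mem_append.mp hy with hy | hy
      · exact (pvCollect_mem_fst _ _ _).mpr (Or.inl (h y hy))
      · exact (pvCollect_mem_fst _ _ _).mpr (Or.inr ((pvCollect_mem_snd _ _ _).mp hy).1)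
    rw [ih _ _ _ h']
    congr 1
    rw [PySem.Set.ofList_append,
        PySem.Set.update_eq_append_of_disjoint _ _ (pvCollect_nodup_snd _ _)]
    intro x hx
    rw [PySem.Set.mem_ofList]
    intro hxo
    exact ((pvCollect_mem_snd _ _ _).mp hx).2 (h x hxo)

-- expanding a frontier with duplicates collects the same as expanding its dedupe
theorem pvCollect_flatMap_dedupe (adj : List (String × List (String × List String))) (ets : List String)
    (xs : List String) (S V : PySem.Set String)
    (h : ∀ u ∈ S, ∀ y ∈ pvNbr adj ets u, y ∈ V) :
    pvCollect V (xs.flatMap (pvNbr adj ets))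
      = pvCollect V (((pvCollect S xs).2).flatMap (pvNbr adj ets)) := by
  induction xs generalizing S V with
  | nil => rfl
  | cons x xs ih =>
    by_cases hS : x ∈ S
    · rw [pvCollect_cons_mem _ _ _ hS, List.flatMap_cons, pvCollect_append,
          pvCollect_noop _ _ (h x hS), ih S V h]
      simp
    · rw [pvCollect_cons_not_mem _ _ _ hS]
      dsimp only
      rw [List.flatMap_cons, List.flatMap_cons, pvCollect_append, pvCollect_append]
      have h' : ∀ u ∈ PySem.Set.add S x, ∀ y ∈ pvNbr adj ets u,
          y ∈ (pvCollect V (pvNbr adj ets x)).1 := by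
        intro u hu y hy
        rcases (PySem.Set.mem_add _ _ _).mp hu with hu | hu
        · exact (pvCollect_mem_fst _ _ _).mpr (Or.inl (h u hu y hy))
        · subst hu
          exact (pvCollect_mem_fst _ _ _).mpr (Or.inr hy)
      rw [ih (PySem.Set.add S x) _ h']

-- ---- port B = canonical level loop ----

theorem pvGetD_mem {β : Type} (l : List (String × List β)) (k : String) (y : β)
    (h : y ∈ (PySem.Dict.mk l).getD k []) : ∃ v, (k, v) ∈ l ∧ y ∈ v := by
  cases hg : (PySem.Dict.mk l).get? k with
  | none =>
    rw [PySem.Dict.getD_of_get?_eq_none _ _ hg] at h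
    simp at h
  | some v =>
    rw [PySem.Dict.getD_of_get?_eq_some _ _ hg] at h
    exact ⟨v, PySem.Dict.mem_items_of_get?_eq_some _ hg, h⟩

theorem pvNbr_sub_allDst (adj : List (String × List (String × List String))) (ets : List String)
    (u y : String) (h : y ∈ pvNbr adj ets u) : y ∈ PySem.Set.ofList (pvAllDst adj) := by
  rw [PySem.Set.mem_ofList]
  unfold pvNbr at h
  rcases List.mem_flatMap.mp h with ⟨et, _, hy⟩
  unfold pvLookup at hy
  rcases pvGetD_mem _ _ _ hy with ⟨v, hv, hyv⟩
  rcases pvGetD_mem _ _ _ hv with ⟨w, hw, hvw⟩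
  unfold pvAllDst
  exact List.mem_flatMap.mpr ⟨(et, w), hw, List.mem_flatMap.mpr ⟨(u, v), hvw, hyv⟩⟩

theorem pvFresh_add (adj : List (String × List (String × List String))) (V : PySem.Set String)
    (x : String) (hx : x ∈ PySem.Set.ofList (pvAllDst adj)) (hv : x ∉ V) :
    pvFresh adj (PySem.Set.add V x) + 1 = pvFresh adj V := by
  unfold pvFresh
  rw [PySem.Set.add_of_not_mem hv]
  have hnd : (PySem.Set.ofList (pvAllDst adj)).Nodup := PySem.Set.nodup_ofList _
  revert hnd hx
  generalize PySem.Set.ofList (pvAllDst adj) = U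
  intro hx hnd
  induction U with
  | nil => simp at hx
  | cons u U' ih =>
    have hu : u ∉ U' := (List.nodup_cons.mp hnd).1
    have hnd' : U'.Nodup := (List.nodup_cons.mp hnd).2
    by_cases hux : u = x
    · subst hux
      have h1 : (!((V ++ [u] : List String).contains u)) = false := by simp
      have h2 : (!((V : List String).contains u)) = true := by simp [hv]
      simp only [List.filter_cons, h1, h2, Bool.false_eq_true, if_false, if_true]
      have : List.filter (fun y => !((V ++ [u] : List String).contains y)) U'
          = List.filter (fun y => !((V : List String).contains y)) U' := by
        refine List.filter_congr (fun y hy => ?_)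
        have hyu : y ≠ u := fun h' => hu (h' ▸ hy)
        simp [hyu]
      rw [this]
      simp
    · have hxU' : x ∈ U' := by
        rcases List.mem_cons.mp hx with h' | h'
        · exact absurd h'.symm hux
        · exact h'
      have hpred : (!((V ++ [x] : List String).contains u)) = (!((V : List String).contains u)) := by
        simp [fun h' : u = x => hux h']
      simp only [List.filter_cons, hpred]
      by_cases hVu : (!((V : List String).contains u)) = true
      · simp only [hVu, if_true, List.length_cons]
        have := ih hxU' hnd'
        omega
      · simp only [hVu, Bool.false_eq_true, if_false]
        exact ih hxU' hnd'

theorem pvFresh_collect (adj : List (String × List (String × List String)))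
    (l : List String) (V : PySem.Set String) (h : ∀ y ∈ l, y ∈ PySem.Set.ofList (pvAllDst adj)) :
    pvFresh adj (pvCollect V l).1 + (pvCollect V l).2.length = pvFresh adj V := by
  induction l generalizing V with
  | nil => simp [pvCollect]
  | cons x l ih =>
    by_cases hv : x ∈ V
    · rw [pvCollect_cons_mem _ _ _ hv]
      exact ih V (fun y hy => h y (by simp [hy]))
    · rw [pvCollect_cons_not_mem _ _ _ hv]
      dsimp only
      rw [List.length_cons]
      have h1 := ih (V.add x) (fun y hy => h y (by simp [hy]))
      have h2 := pvFresh_add adj V x (h x (by simp)) hv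
      omega

theorem pvGoB_deep (adj : List (String × List (String × List String))) (ets : List String)
    (radius : Int) (fuel : Nat) (q : List (String × Int)) (V : PySem.Set String) (out : List String)
    (h : ∀ p ∈ q, ¬ (p.2 < radius)) :
    pvGoB adj ets radius fuel q V out = out := by
  induction fuel generalizing q with
  | zero => rfl
  | succ fuel ih =>
    match q with
    | [] => rfl
    | (u, d) :: rest =>
      have hd : ¬ (d < radius) := h (u, d) (by simp)
      show (if d < radius then _ else pvGoB adj ets radius fuel rest V out) = out
      rw [if_neg hd]
      exact ih rest (fun p hp => h p (by simp [hp]))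

-- B's inner neighbour loop in terms of pvCollect
theorem pvFoldlNbr {σ : Type} (adj : List (String × List (String × List String)))
    (ets : List String) (u : String) (f : σ → String → σ) (init : σ) :
    ets.foldl (fun st et => (pvLookup adj et u).foldl f st) init
      = (pvNbr adj ets u).foldl f init := by
  induction ets generalizing init with
  | nil => rfl
  | cons et ets ih =>
    simp only [List.foldl_cons, pvNbr, List.flatMap_cons, List.foldl_append]
    exact ih _

theorem pvTriple (d : Int) (l : List String) (V : PySem.Set String) (out : List String)
    (q : List (String × Int)) :
    l.foldl
      (fun (st : PySem.Set String × List String × List (String × Int)) dst =>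
        if PySem.Set.contains st.1 dst then st
        else (PySem.Set.add st.1 dst, st.2.1 ++ [dst], st.2.2 ++ [(dst, d + 1)]))
      (V, out, q)
    = ((pvCollect V l).1, out ++ (pvCollect V l).2,
       q ++ (pvCollect V l).2.map (fun y => (y, d + 1))) := by
  induction l generalizing V out q with
  | nil => simp [pvCollect]
  | cons x l ih =>
    simp only [List.foldl_cons]
    by_cases hx : x ∈ V
    · rw [show (if PySem.Set.contains V x then ((V, out, q) : PySem.Set String × List String × List (String × Int))
            else (PySem.Set.add V x, out ++ [x], q ++ [(x, d + 1)])) = (V, out, q) from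
          by simp [hx], ih, pvCollect_cons_mem _ _ _ hx]
    · rw [show (if PySem.Set.contains V x then ((V, out, q) : PySem.Set String × List String × List (String × Int))
            else (PySem.Set.add V x, out ++ [x], q ++ [(x, d + 1)]))
            = (PySem.Set.add V x, out ++ [x], q ++ [(x, d + 1)]) from by simp [hx],
          ih, pvCollect_cons_not_mem _ _ _ hx]
      simp

theorem pvBInner (adj : List (String × List (String × List String))) (ets : List String)
    (u : String) (d : Int) (V : PySem.Set String) (out : List String) (q : List (String × Int)) :
    ets.foldl
      (fun (st : PySem.Set String × List String × List (String × Int)) et =>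
        (pvLookup adj et u).foldl
          (fun st dst =>
            if PySem.Set.contains st.1 dst then st
            else (PySem.Set.add st.1 dst, st.2.1 ++ [dst], st.2.2 ++ [(dst, d + 1)]))
          st)
      (V, out, q)
    = ((pvCollect V (pvNbr adj ets u)).1,
       out ++ (pvCollect V (pvNbr adj ets u)).2,
       q ++ (pvCollect V (pvNbr adj ets u)).2.map (fun y => (y, d + 1))) := by
  rw [pvFoldlNbr adj ets u _ ((V, out, q) : PySem.Set String × List String × List (String × Int))]
  exact pvTriple d (pvNbr adj ets u) V out q

theorem pvGoB_cons (adj : List (String × List (String × List String))) (ets : List String)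
    (radius : Int) (fuel : Nat) (u : String) (d : Int) (rest : List (String × Int))
    (V : PySem.Set String) (out : List String) (hd : d < radius) :
    pvGoB adj ets radius (fuel+1) ((u, d) :: rest) V out
      = pvGoB adj ets radius fuel
          (rest ++ (pvCollect V (pvNbr adj ets u)).2.map (fun y => (y, d + 1)))
          (pvCollect V (pvNbr adj ets u)).1
          (out ++ (pvCollect V (pvNbr adj ets u)).2) := by
  simp only [pvGoB]
  rw [if_pos hd, pvBInner]

-- main simulation: the queue holds the unprocessed frontier at depth δ = radius-(n+1)
-- followed by the next level discovered so far at depth δ+1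
theorem pvSim (adj : List (String × List (String × List String))) (ets : List String)
    (radius : Int) (n : Nat) :
    ∀ (δ : Int), δ + (n + 1) = radius →
    ∀ (q1 q2 : List String) (V : PySem.Set String) (out : List String) (fuel : Nat),
    q1.length + q2.length + pvFresh adj V ≤ fuel →
    pvGoB adj ets radius fuel
      (q1.map (fun v => (v, δ)) ++ q2.map (fun v => (v, δ + 1))) V out
    = pvCanon adj ets n (q2 ++ (pvCollect V (q1.flatMap (pvNbr adj ets))).2)
        (pvCollect V (q1.flatMap (pvNbr adj ets))).1
        (out ++ (pvCollect V (q1.flatMap (pvNbr adj ets))).2) := by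
  induction n using Nat.strong_induction_on with
  | _ n IH =>
  intro δ hδ q1
  induction q1 with
  | nil =>
    intro q2 V out fuel hfuel0
    cases n with
    | zero =>
      rw [pvGoB_deep]
      · rw [show pvCollect V ([].flatMap (pvNbr adj ets)) = (V, []) from rfl]
        simp [pvCanon]
      · intro p hp
        simp only [List.map_nil, List.nil_append, List.mem_map] at hp
        rcases hp with ⟨v, _, rfl⟩
        simp only []
        omega
    | succ m =>
      have h1 := IH m (by omega) (δ + 1) (by omega) q2 [] V out fuel
        (by simp only [List.length_nil] at hfuel0 ⊢; omega)
      simp only [List.map_nil, List.append_nil, List.nil_append] at h1 ⊢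
      rw [h1]
      rw [show pvCollect V ([].flatMap (pvNbr adj ets)) = (V, []) from rfl]
      simp only [List.append_nil]
      rw [pvCanon_succ]
  | cons u q1' ihq =>
    intro q2 V out fuel hfuel
    obtain ⟨f, rfl⟩ : ∃ f, fuel = f + 1 := ⟨fuel - 1, by simp at hfuel; omega⟩
    simp only [List.map_cons, List.cons_append]
    rw [pvGoB_cons adj ets radius f u δ _ V out (by omega)]
    rw [List.append_assoc, ← List.map_append]
    have hcnt := pvFresh_collect adj (pvNbr adj ets u) V
      (fun y hy => pvNbr_sub_allDst adj ets u y hy)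
    have hfuel' : q1'.length + (q2 ++ (pvCollect V (pvNbr adj ets u)).2).length
        + pvFresh adj (pvCollect V (pvNbr adj ets u)).1 ≤ f := by
      simp only [List.length_append, List.length_cons] at hfuel ⊢
      omega
    rw [ihq (q2 ++ (pvCollect V (pvNbr adj ets u)).2) (pvCollect V (pvNbr adj ets u)).1
        (out ++ (pvCollect V (pvNbr adj ets u)).2) f hfuel']
    rw [List.flatMap_cons, pvCollect_append]
    simp [List.append_assoc]

theorem pvAdjSize_eq (adj : List (String × List (String × List String))) :
    pvAdjSize adj = (pvAllDst adj).length := by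
  unfold pvAdjSize pvAllDst
  have hstep : (fun (acc : Nat) (p : String × List (String × List String)) =>
      List.foldl (fun acc2 q => acc2 + q.2.length) acc p.2)
      = (fun acc p => acc + (p.2.map (fun q => q.2.length)).sum) := by
    funext acc p
    exact PySem.List.foldl_add_nat p.2 (fun q => q.2.length) acc
  rw [hstep, PySem.List.foldl_add_nat]
  simp [List.length_flatMap]

-- ===== VERDICT (by name: the statement is the Claim_ definition above) =====
theorem expand_nodes_spec : Claim_equal_expand_nodes := by
  intro node_ids adj ets radius _
  unfold Spec_expand_nodes expand_nodes expand_nodes_alt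
  have hseed : node_ids.foldl (fun (st : PySem.Set String × List String) nid =>
      if PySem.Set.contains st.1 nid then st else (PySem.Set.add st.1 nid, st.2 ++ [nid]))
      (PySem.Set.empty, []) = (PySem.Set.ofList node_ids, PySem.Set.ofList node_ids) :=
    pvCollect_empty node_ids
  rw [hseed]
  by_cases hr : radius ≤ 0
  · have ht : radius.toNat = 0 := by omega
    rw [ht]
    rw [show pvLoopA adj ets 0 node_ids node_ids = node_ids from rfl]
    rw [pvDedupe_eq_ofList]
    rw [pvGoB_deep]
    intro p hp
    simp only [List.mem_map] at hp
    rcases hp with ⟨v, _, rfl⟩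
    simp only []
    omega
  · rw [Int.not_le] at hr
    obtain ⟨r', hr'⟩ : ∃ r', radius.toNat = r' + 1 := ⟨radius.toNat - 1, by omega⟩
    have hrr : ((r' : Int) + 1) = radius := by
      have h0 := Int.toNat_of_nonneg (le_of_lt hr)
      omega
    rw [hr', pvDedupe_eq_ofList]
    rw [pvLoopA_eq_canon adj ets (r'+1) node_ids node_ids (PySem.Set.ofList node_ids)
        (fun y => PySem.Set.mem_ofList _ _)]
    rw [pvCanon_dedupe adj ets (r'+1) node_ids node_ids (PySem.Set.ofList node_ids)
        (fun y hy => (PySem.Set.mem_ofList _ _).mpr hy)]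
    rw [pvCanon_succ]
    rw [pvCollect_flatMap_dedupe adj ets node_ids PySem.Set.empty (PySem.Set.ofList node_ids)
        (fun u hu => by simp [PySem.Set.empty] at hu)]
    rw [show (pvCollect PySem.Set.empty node_ids).2 = PySem.Set.ofList node_ids from
        by rw [pvCollect_empty]]
    have hfuel : (PySem.Set.ofList node_ids).length + ([] : List String).length
        + pvFresh adj (PySem.Set.ofList node_ids) ≤ node_ids.length + pvAdjSize adj + 1 := by
      have h1 : (PySem.Set.ofList node_ids).length ≤ node_ids.length :=
        PySem.Set.length_ofList_le _
      have h2 : pvFresh adj (PySem.Set.ofList node_ids) ≤ pvAdjSize adj := by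
        unfold pvFresh
        rw [pvAdjSize_eq]
        calc ((PySem.Set.ofList (pvAllDst adj)).filter _).length
            ≤ (PySem.Set.ofList (pvAllDst adj)).length := List.length_filter_le _ _
          _ ≤ (pvAllDst adj).length := PySem.Set.length_ofList_le _
      simp only [List.length_nil]
      omega
    have hsim := pvSim adj ets radius r' 0 (by omega) (PySem.Set.ofList node_ids) []
      (PySem.Set.ofList node_ids) (PySem.Set.ofList node_ids)
      (node_ids.length + pvAdjSize adj + 1) hfuel
    simp only [List.map_nil, List.append_nil, List.nil_append] at hsim
    rw [hsim]
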